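-- pv_equiv track=rewrite | github.com/Hipposdata/Algorithm | 프로그래머스/1/12917. 문자열 내림차순으로 배치하기/문자열 내림차순으로 배치하기.py | solution
-- ===== SOURCE A (Python) =====
-- def solution(s):
--     up = []
--     low = []
--     for i in list(s):
--         if i.isupper():
--           up.append(i)
--         else:
--             low.append(i)
--
--     dap = sorted(low,reverse = True) + sorted(up,reverse = True)
--
--     return ''.join(dap)
-- ===== SOURCE B (Python) =====
-- def solution(s):
--     counts = [0] * 128
--     for ch in s:
--         counts[ord(ch)] += 1
--     parts = []
--     for code in range(127, -1, -1):
--         if not (65 <= code <= 90):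
--             parts.append(chr(code) * counts[code])
--     for code in range(90, 64, -1):
--         parts.append(chr(code) * counts[code])
--     return ''.join(parts)
-- ===== Notes on version B (the rewrite author's own statement) =====
-- stated objective: faster
-- what changed: replaces the partition plus two comparison sorts with a single counting pass over a 128-slot table, then emits the buckets in descending code order (non-uppercase codes first, then Z..A)
import Mathlib
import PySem

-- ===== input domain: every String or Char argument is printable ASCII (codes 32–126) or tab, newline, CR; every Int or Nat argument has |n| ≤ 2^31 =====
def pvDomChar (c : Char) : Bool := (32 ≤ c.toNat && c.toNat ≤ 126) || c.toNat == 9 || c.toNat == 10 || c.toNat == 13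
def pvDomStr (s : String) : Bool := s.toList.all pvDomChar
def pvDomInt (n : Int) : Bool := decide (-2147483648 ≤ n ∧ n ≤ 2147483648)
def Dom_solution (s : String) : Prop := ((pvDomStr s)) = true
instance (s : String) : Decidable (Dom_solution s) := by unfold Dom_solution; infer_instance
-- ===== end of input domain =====

-- B replaces A's partition + two comparison sorts by one counting pass over a 128-slot table,
-- emitting the buckets in descending code order (non-uppercase first, then Z..A).

-- ===== PORT A =====
def solution (s : String) : String :=
  let p := s.toList.foldl (fun (acc : List Char × List Char) i =>
    if PySem.Chars.isupper i then (acc.1 ++ [i], acc.2) else (acc.1, acc.2 ++ [i])) ([], [])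
  let dap := PySem.List.sorted p.2 (fun x => x) true ++ PySem.List.sorted p.1 (fun x => x) true
  String.ofList dap

-- ===== PORT B =====
def solution_alt (s : String) : String :=
  let counts : List Nat := s.toList.foldl (fun acc ch => acc.modify ch.toNat (· + 1)) (List.replicate 128 0)
  let parts : List (List Char) :=
    ((PySem.List.pyRange 127 (-1) (-1)).foldl
      (fun acc code => if ¬ (65 ≤ code ∧ code ≤ 90) then
        acc ++ [List.replicate (counts.getD code.toNat 0) (Char.ofNat code.toNat)] else acc) [])
    ++ ((PySem.List.pyRange 90 64 (-1)).foldl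
      (fun acc code => acc ++ [List.replicate (counts.getD code.toNat 0) (Char.ofNat code.toNat)]) [])
  String.ofList parts.flatten

-- ===== PRECONDITION & SPEC =====
def Spec_solution (s : String) (out : String) : Prop := out = solution_alt s
instance (s : String) (out : String) : Decidable (Spec_solution s out) := by unfold Spec_solution; infer_instance

-- ===== CLAIM (what is proved, stated in full; the proofs are below) =====
def Claim_equal_solution : Prop := ∀ (s : String), Dom_solution s → Spec_solution s (solution s)

-- ===== LEMMAS AND PROOFS =====

-- descending-order key on characters
def pvKey (c : Char) : Int := -(c.toNat : Int)

lemma pvKey_inj : Function.Injective pvKey := by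
  intro a b h
  have h2 : a.toNat = b.toNat := by unfold pvKey at h; omega
  have := congrArg Char.ofNat h2
  simpa [Char.ofNat_toNat] using this

lemma char_le_iff (a b : Char) : a ≤ b ↔ a.toNat ≤ b.toNat := Char.le_def

lemma toNat_ofNat_lt {n : Nat} (h : n < 128) : (Char.ofNat n).toNat = n := by
  have hv : n.isValidChar := Or.inl (by omega)
  rw [Char.ofNat, dif_pos hv]
  exact Char.toNat_ofNatAux hv

lemma isupper_iff (c : Char) : PySem.Chars.isupper c = true ↔ (65 ≤ c.toNat ∧ c.toNat ≤ 90) := by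
  simp [PySem.Chars.isupper, char_le_iff]

lemma char_eq_ofNat_iff (x : Char) (c : Int) (h0 : 0 ≤ c) (h : c < 128) :
    (x = Char.ofNat c.toNat) ↔ ((x.toNat : Int) = c) := by
  constructor
  · rintro rfl
    rw [toNat_ofNat_lt (by omega)]
    omega
  · intro hx
    have : x.toNat = c.toNat := by omega
    rw [← this, Char.ofNat_toNat]

-- A's loop is a partition
lemma foldA (cs : List Char) (u l : List Char) :
    cs.foldl (fun (acc : List Char × List Char) i =>
      if PySem.Chars.isupper i then (acc.1 ++ [i], acc.2) else (acc.1, acc.2 ++ [i])) (u, l)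
    = (u ++ cs.filter PySem.Chars.isupper, l ++ cs.filter (fun i => !PySem.Chars.isupper i)) := by
  induction cs generalizing u l with
  | nil => simp
  | cons x t ih =>
    by_cases hx : PySem.Chars.isupper x = true <;> simp [hx, ih]

-- B's counting loop computes occurrence counts
lemma counts_getD (cs : List Char) (init : List Nat) (hlen : init.length = 128)
    (hcs : ∀ x ∈ cs, x.toNat < 128) (c : Nat) (hc : c < 128) :
    (cs.foldl (fun acc ch => acc.modify ch.toNat (· + 1)) init).getD c 0
      = init.getD c 0 + cs.countP (fun ch => ch.toNat == c) := by
  induction cs generalizing init with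
  | nil => simp
  | cons x t ih =>
    have hlen' : (init.modify x.toNat (· + 1)).length = 128 := by simpa using hlen
    have ht : ∀ y ∈ t, y.toNat < 128 := fun y hy => hcs y (by simp [hy])
    have hstep : (init.modify x.toNat (· + 1)).getD c 0
        = init.getD c 0 + (if x.toNat == c then 1 else 0) := by
      have hc' : c < init.length := by omega
      rw [List.getD_eq_getElem?_getD, List.getD_eq_getElem?_getD, List.getElem?_modify,
        List.getElem?_eq_getElem hc']
      by_cases h : x.toNat = c <;> simp [h]
    simp only [List.foldl_cons, ih _ hlen' ht, hstep, List.countP_cons]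
    by_cases h : x.toNat = c <;> simp [h]
    omega

lemma count_flatMap_bucket (codes : List Int) (f : Int → Nat) (x : Char)
    (hn : codes.Nodup) (hc : ∀ c ∈ codes, 0 ≤ c ∧ c < 128) :
    (codes.flatMap (fun c => List.replicate (f c) (Char.ofNat c.toNat))).count x
      = if ((x.toNat : Int) ∈ codes) then f ((x.toNat : Int)) else 0 := by
  induction codes with
  | nil => simp
  | cons c t ih =>
    have hcb := hc c (by simp)
    have hteq := ih (hn.of_cons) (fun d hd => hc d (by simp [hd]))
    rw [List.flatMap_cons, List.count_append, List.count_replicate, hteq]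
    by_cases hx : (x.toNat : Int) = c
    · have hxc : x = Char.ofNat c.toNat := (char_eq_ofNat_iff x c hcb.1 hcb.2).mpr hx
      have hnt : (x.toNat : Int) ∉ t := by
        rw [hx]; exact (List.nodup_cons.mp hn).1
      rw [← hxc, hx]
      have hnt' : c ∉ t := hx ▸ hnt
      simp [hnt']
    · have hxc : ¬ (x = Char.ofNat c.toNat) := fun h => hx ((char_eq_ofNat_iff x c hcb.1 hcb.2).mp h)
      by_cases hm : (x.toNat : Int) ∈ t <;>
        simp [hm, hx] <;> exact fun h => absurd h.symm hxc

lemma perm_flatMap_bucket (codes : List Int) (l : List Char)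
    (hn : codes.Nodup) (hc : ∀ c ∈ codes, 0 ≤ c ∧ c < 128)
    (hl : ∀ x ∈ l, (x.toNat : Int) ∈ codes) :
    (codes.flatMap (fun c => List.replicate (l.count (Char.ofNat c.toNat)) (Char.ofNat c.toNat))).Perm l := by
  rw [List.perm_iff_count]
  intro x
  rw [count_flatMap_bucket codes _ x hn hc]
  by_cases hm : (x.toNat : Int) ∈ codes
  · simp [hm, Char.ofNat_toNat]
  · rw [if_neg hm]
    have hx : x ∉ l := fun h => hm (hl x h)
    exact (List.count_eq_zero.mpr hx).symm

lemma pairwise_flatMap_bucket (codes : List Int) (f : Int → Nat)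
    (hc : ∀ c ∈ codes, 0 ≤ c ∧ c < 128) (hp : codes.Pairwise (fun a b => b < a)) :
    (codes.flatMap (fun c => List.replicate (f c) (Char.ofNat c.toNat))).Pairwise
      (fun a b => pvKey a ≤ pvKey b) := by
  induction codes with
  | nil => simp
  | cons c t ih =>
    rw [List.flatMap_cons, List.pairwise_append]
    refine ⟨?_, ih (fun d hd => hc d (by simp [hd])) hp.of_cons, ?_⟩
    · exact List.pairwise_replicate.mpr (Or.inr (le_refl _))
    · intro a ha b hb
      have ha' : a = Char.ofNat c.toNat := List.eq_of_mem_replicate ha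
      obtain ⟨d, hd, hbd⟩ := List.mem_flatMap.mp hb
      have hb' : b = Char.ofNat d.toNat := List.eq_of_mem_replicate hbd
      have hdc : d < c := (List.pairwise_cons.mp hp).1 d hd
      have hcb := hc c (by simp)
      have hdb := hc d (by simp [hd])
      rw [ha', hb']
      unfold pvKey
      rw [toNat_ofNat_lt (show c.toNat < 128 by omega), toNat_ofNat_lt (show d.toNat < 128 by omega)]
      omega

lemma pairwise_key_sorted (xs : List Char) :
    (PySem.List.sorted xs (fun x => x) true).Pairwise (fun a b => pvKey a ≤ pvKey b) := by
  have := PySem.List.sorted_pairwise_rev xs (fun x => x)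
  refine this.imp ?_
  intro a b h
  have := (char_le_iff b a).mp h
  unfold pvKey; omega

lemma nodup_pyRange_down (a b : Int) : (PySem.List.pyRange a b (-1)).Nodup := by
  rw [PySem.List.pyRange_neg_one_eq_reverse, List.nodup_reverse]
  exact PySem.List.nodup_pyRange_one (b + 1) (a + 1)

lemma pairwise_gt_pyRange_down (a b : Int) :
    (PySem.List.pyRange a b (-1)).Pairwise (fun x y => y < x) := by
  rw [PySem.List.pyRange_neg_one_eq_reverse, List.pairwise_reverse]
  exact PySem.List.pairwise_lt_pyRange_one (b + 1) (a + 1)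

-- the list of codes B's first loop keeps
def pvCodesNon : List Int :=
  (PySem.List.pyRange 127 (-1) (-1)).filter (fun code => decide ¬ (65 ≤ code ∧ code ≤ 90))

lemma mem_pvCodesNon (x : Int) : x ∈ pvCodesNon ↔ (0 ≤ x ∧ x ≤ 127 ∧ ¬ (65 ≤ x ∧ x ≤ 90)) := by
  unfold pvCodesNon
  rw [List.mem_filter, PySem.List.mem_pyRange_neg_one]
  simp; omega

lemma mem_pyCodesUp (x : Int) : x ∈ PySem.List.pyRange 90 64 (-1) ↔ (65 ≤ x ∧ x ≤ 90) := by
  rw [PySem.List.mem_pyRange_neg_one]; omega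

-- the two counting-sort buckets equal the two comparison sorts
lemma bucket_eq_sorted (codes : List Int) (l : List Char)
    (hn : codes.Nodup) (hc : ∀ c ∈ codes, 0 ≤ c ∧ c < 128)
    (hl : ∀ x ∈ l, (x.toNat : Int) ∈ codes) (hp : codes.Pairwise (fun a b => b < a)) :
    PySem.List.sorted l (fun x => x) true
      = codes.flatMap (fun c => List.replicate (l.count (Char.ofNat c.toNat)) (Char.ofNat c.toNat)) := by
  refine PySem.List.eq_of_perm_of_pairwise_le_of_injective pvKey pvKey_inj ?_ ?_ ?_
  · exact (PySem.List.sorted_perm l (fun x => x) true).trans (perm_flatMap_bucket codes l hn hc hl).symm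
  · exact pairwise_key_sorted l
  · exact pairwise_flatMap_bucket codes _ hc hp

-- ===== VERDICT (by name: the statement is the Claim_ definition above) =====
theorem solution_spec : Claim_equal_solution := by
  intro s hdom
  show solution s = solution_alt s
  have hchars : ∀ x ∈ s.toList, x.toNat < 128 := by
    intro x hx
    have := List.all_eq_true.mp hdom x hx
    simp [pvDomChar] at this
    omega
  simp only [solution, solution_alt]
  rw [foldA, PySem.List.foldl_append_ite, PySem.List.foldl_append_singleton_eq_map]
  simp only [List.nil_append, List.flatten_append, ← List.flatMap_def]
  have hcnt : ∀ c : Int, 0 ≤ c → c < 128 →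
      (List.foldl (fun acc ch => acc.modify ch.toNat fun x => x + 1) (List.replicate 128 0) s.toList).getD c.toNat 0
        = s.toList.count (Char.ofNat c.toNat) := by
    intro c h0 h1
    rw [counts_getD s.toList _ (by simp) hchars c.toNat (by omega)]
    rw [List.count_eq_countP]
    have hrep : (List.replicate 128 (0:Nat)).getD c.toNat 0 = 0 := by
      rw [List.getD_eq_getElem?_getD, List.getElem?_replicate]
      split <;> rfl
    rw [hrep, Nat.zero_add]
    apply List.countP_congr
    intro x hx
    by_cases h : x.toNat = c.toNat
    · have hx' : x = Char.ofNat c.toNat := by rw [← h, Char.ofNat_toNat]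
      simp [hx', toNat_ofNat_lt (show c.toNat < 128 by omega)]
    · have hx' : ¬ (x = Char.ofNat c.toNat) := by
        intro he; exact h (by rw [he, toNat_ofNat_lt (show c.toNat < 128 by omega)])
      simp [h, hx']
  apply congrArg
  congr 1
  · -- non-uppercase bucket
    have hcN : ∀ c ∈ pvCodesNon, 0 ≤ c ∧ c < 128 := by
      intro c hc; have := (mem_pvCodesNon c).mp hc; omega
    have hnN : pvCodesNon.Nodup := List.Nodup.filter _ (nodup_pyRange_down 127 (-1))
    have hpN : pvCodesNon.Pairwise (fun a b => b < a) :=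
      List.Pairwise.filter _ (pairwise_gt_pyRange_down 127 (-1))
    have hlN : ∀ x ∈ s.toList.filter (fun i => !PySem.Chars.isupper i), ((x.toNat : Int) ∈ pvCodesNon) := by
      intro x hx
      obtain ⟨hxm, hxu⟩ := List.mem_filter.mp hx
      have h128 := hchars x hxm
      have hnu : ¬ (65 ≤ x.toNat ∧ x.toNat ≤ 90) := by
        intro h; rw [(isupper_iff x).mpr h] at hxu; simp at hxu
      rw [mem_pvCodesNon]; omega
    rw [bucket_eq_sorted pvCodesNon _ hnN hcN hlN hpN]
    rw [List.flatMap_def, List.flatMap_def]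
    apply congrArg List.flatten
    apply List.map_congr_left
    intro code hcode
    have hb := (mem_pvCodesNon code).mp hcode
    have hup : (!PySem.Chars.isupper (Char.ofNat code.toNat)) = true := by
      simp only [Bool.not_eq_true']
      rw [← Bool.not_eq_true]
      intro h
      have := (isupper_iff _).mp h
      rw [toNat_ofNat_lt (show code.toNat < 128 by omega)] at this
      omega
    rw [List.count_filter (p := fun i => !PySem.Chars.isupper i) hup, hcnt code hb.1 (by omega)]
  · -- uppercase bucket
    have hcU : ∀ c ∈ PySem.List.pyRange 90 64 (-1), 0 ≤ c ∧ c < 128 := by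
      intro c hc; have := (mem_pyCodesUp c).mp hc; omega
    have hlU : ∀ x ∈ s.toList.filter PySem.Chars.isupper, ((x.toNat : Int) ∈ PySem.List.pyRange 90 64 (-1)) := by
      intro x hx
      obtain ⟨hxm, hxu⟩ := List.mem_filter.mp hx
      have := (isupper_iff x).mp hxu
      rw [mem_pyCodesUp]; omega
    rw [bucket_eq_sorted _ _ (nodup_pyRange_down 90 64) hcU hlU (pairwise_gt_pyRange_down 90 64)]
    rw [List.flatMap_def, List.flatMap_def]
    apply congrArg List.flatten
    apply List.map_congr_left
    intro code hcode
    have hb := (mem_pyCodesUp code).mp hcode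
    have hup : PySem.Chars.isupper (Char.ofNat code.toNat) = true := by
      rw [isupper_iff, toNat_ofNat_lt (show code.toNat < 128 by omega)]
      omega
    rw [List.count_filter (p := PySem.Chars.isupper) hup, hcnt code (by omega) (by omega)]
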